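-- pv_equiv track=rewrite | github.com/Alexis-Sola/ModeleStochastique | MDPHorizonInfini.py | InsertValue
-- ===== SOURCE A (Python) =====
-- def InsertValue(valueTable):
--     new_table = []
--     cpt = 0
--     for val in valueTable:
--         if cpt == 5:
--             new_table.append([0])
--         new_table.append(val)
--         cpt = cpt + 1
--     return new_table
-- ===== SOURCE B (Python) =====
-- def InsertValue(valueTable):
--     if len(valueTable) > 5:
--         return list(valueTable[:5]) + [[0]] + list(valueTable[5:])
--     return list(valueTable)
-- ===== Notes on version B (the rewrite author's own statement) =====
-- stated objective: simpler
-- what changed: Replaces the counter-driven accumulating loop with a direct slice split at index 5: valueTable[:5] + [[0]] + valueTable[5:] when the list has more than 5 elements, else a plain copy.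
import Mathlib
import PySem

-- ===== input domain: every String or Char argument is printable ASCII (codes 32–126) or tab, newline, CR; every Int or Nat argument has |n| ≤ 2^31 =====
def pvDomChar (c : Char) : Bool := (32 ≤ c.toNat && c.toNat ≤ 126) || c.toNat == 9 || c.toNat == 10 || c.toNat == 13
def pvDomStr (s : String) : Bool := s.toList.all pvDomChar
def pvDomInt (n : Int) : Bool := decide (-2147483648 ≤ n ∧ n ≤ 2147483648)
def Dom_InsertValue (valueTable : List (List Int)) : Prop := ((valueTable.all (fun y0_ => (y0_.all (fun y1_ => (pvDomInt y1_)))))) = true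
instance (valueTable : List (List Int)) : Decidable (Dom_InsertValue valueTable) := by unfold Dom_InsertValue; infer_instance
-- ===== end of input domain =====

-- ===== PORT A =====
-- A: accumulate into new_table with a counter, appending [0] when the counter hits 5
def InsertValue (valueTable : List (List Int)) : List (List Int) :=
  (valueTable.foldl
    (fun (st : List (List Int) × Int) val =>
      ((if st.2 = 5 then st.1 ++ [[0]] else st.1) ++ [val], st.2 + 1))
    ([], 0)).1

-- ===== PORT B =====
-- B: slice split at index 5 (simpler: no counter, no per-element branch)
def InsertValue_alt (valueTable : List (List Int)) : List (List Int) :=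
  if valueTable.length > 5 then
    valueTable.take 5 ++ [[0]] ++ valueTable.drop 5
  else valueTable

-- ===== PRECONDITION & SPEC =====
def Spec_InsertValue (valueTable : List (List Int)) (out : List (List Int)) : Prop := out = InsertValue_alt valueTable
instance (valueTable : List (List Int)) (out : List (List Int)) : Decidable (Spec_InsertValue valueTable out) := by unfold Spec_InsertValue; infer_instance

-- ===== CLAIM (what is proved, stated in full; the proofs are below) =====
def Claim_equal_InsertValue : Prop := ∀ (valueTable : List (List Int)), Dom_InsertValue valueTable → Spec_InsertValue valueTable (InsertValue valueTable)

-- ===== LEMMAS AND PROOFS =====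

-- ===== VERDICT (by name: the statement is the Claim_ definition above) =====
-- Loop invariant: foldl with counter c ≥ 0 from accumulator acc produces acc ++
-- (take (5-c) xs ++ [[0]] ++ drop (5-c) xs) when the insert point is reached, else acc ++ xs.
theorem foldl_char (xs : List (List Int)) (acc : List (List Int)) (c : Int) (hc : 0 ≤ c) :
    (xs.foldl
      (fun (st : List (List Int) × Int) val =>
        ((if st.2 = 5 then st.1 ++ [[0]] else st.1) ++ [val], st.2 + 1))
      (acc, c)).1 =
    if c ≤ 5 ∧ (xs.length : Int) > 5 - c then
      acc ++ xs.take (5 - c).toNat ++ [[0]] ++ xs.drop (5 - c).toNat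
    else acc ++ xs := by
  induction xs generalizing acc c with
  | nil => simp
  | cons x xs ih =>
    simp only [List.foldl_cons]
    rw [ih _ _ (by omega)]
    by_cases h5 : c = 5
    · subst h5
      rw [if_pos rfl]
      split_ifs with h <;> simp_all <;> omega
    · rw [if_neg h5]
      split_ifs with h h' h''
      · have htn : (5 - c).toNat = (5 - (c + 1)).toNat + 1 := by omega
        simp [htn]
      · exfalso; simp only [List.length_cons] at h'; push_cast at h h'; omega
      · exfalso; simp only [List.length_cons] at h''; push_cast at h h''; omega
      · simp

theorem InsertValue_spec : Claim_equal_InsertValue := by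
  intro vt _
  unfold Spec_InsertValue InsertValue InsertValue_alt
  rw [foldl_char vt [] 0 le_rfl]
  split_ifs with h1 h2 h2 <;> simp_all
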